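-- pv_equiv track=rewrite | github.com/anhyunjunKAISTEE/designcon2025_ver3 | reward_utils_2.py | via_config_select
-- ===== SOURCE A (Python) =====
-- def via_config_select(outputs):
--     max_count = 0
--     selected_sub_arrays = []
--
--     for sub_array in outputs:
--         count = sum(row.count(3) for row in sub_array)
--         if count > max_count:
--             max_count = count
--             selected_sub_arrays = [sub_array]
--         elif count == max_count:
--             selected_sub_arrays.append(sub_array)
--
--     return selected_sub_arrays
-- ===== SOURCE B (Python) =====
-- def via_config_select(outputs):
--     counts = [sum(row.count(3) for row in sub_array) for sub_array in outputs]
--     m = max(counts, default=0)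
--     return [sa for sa, c in zip(outputs, counts) if c == m]
-- ===== Notes on version B (the rewrite author's own statement) =====
-- stated objective: simpler
-- what changed: Replaced the running-max-with-tie-reset single pass by a two-pass shape: build the count table, take its max (default 0), then filter the sub-arrays whose count equals the max.
import Mathlib
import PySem

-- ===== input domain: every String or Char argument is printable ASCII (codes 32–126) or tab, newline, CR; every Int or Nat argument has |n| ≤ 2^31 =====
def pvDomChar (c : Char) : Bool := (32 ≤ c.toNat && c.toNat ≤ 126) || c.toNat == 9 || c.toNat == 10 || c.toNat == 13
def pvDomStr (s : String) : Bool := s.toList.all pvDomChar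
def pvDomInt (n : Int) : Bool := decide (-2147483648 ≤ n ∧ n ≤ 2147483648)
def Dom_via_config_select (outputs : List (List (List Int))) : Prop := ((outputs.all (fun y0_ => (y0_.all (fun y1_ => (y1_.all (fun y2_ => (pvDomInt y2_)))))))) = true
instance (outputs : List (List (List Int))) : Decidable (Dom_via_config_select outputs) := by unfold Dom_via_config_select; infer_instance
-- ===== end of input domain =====

-- ===== PORT A =====
-- B changes the single running-max/tie-reset pass into count-table + max + filter (objective: simpler).
def via_config_select (outputs : List (List (List Int))) : List (List (List Int)) :=
  (outputs.foldl (fun (st : Int × List (List (List Int))) sub_array =>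
      let count := (sub_array.map (fun row => (PySem.List.count row 3 : Int))).sum
      if count > st.1 then (count, [sub_array])
      else if count = st.1 then (st.1, st.2 ++ [sub_array])
      else st) ((0 : Int), [])).2

-- ===== PORT B =====
def via_config_select_alt (outputs : List (List (List Int))) : List (List (List Int)) :=
  let counts := outputs.map (fun sub_array => (sub_array.map (fun row => (PySem.List.count row 3 : Int))).sum)
  let m := counts.foldl max (0 : Int)
  ((outputs.zip counts).filter (fun p => p.2 = m)).map (fun p => p.1)

-- ===== PRECONDITION & SPEC =====
def Spec_via_config_select (outputs : List (List (List Int))) (out : List (List (List Int))) : Prop := out = via_config_select_alt outputs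
instance (outputs : List (List (List Int))) (out : List (List (List Int))) : Decidable (Spec_via_config_select outputs out) := by unfold Spec_via_config_select; infer_instance

-- ===== CLAIM (what is proved, stated in full; the proofs are below) =====
def Claim_equal_via_config_select : Prop := ∀ (outputs : List (List (List Int))), Dom_via_config_select outputs → Spec_via_config_select outputs (via_config_select outputs)

-- ===== LEMMAS AND PROOFS =====

-- ===== VERDICT (by name: the statement is the Claim_ definition above) =====
-- count of a sub_array
def pvCnt (sa : List (List Int)) : Int := (sa.map (fun row => (PySem.List.count row 3 : Int))).sum

theorem pv_le_foldl_max (l : List Int) (m : Int) : m ≤ l.foldl max m := by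
  induction l generalizing m with
  | nil => simp
  | cons x xs ih => exact le_trans (le_max_left m x) (ih (max m x))

theorem pv_fold_char (l : List (List (List Int))) (m0 : Int) (sel0 : List (List (List Int))) :
    l.foldl (fun (st : Int × List (List (List Int))) sub_array =>
      let count := pvCnt sub_array
      if count > st.1 then (count, [sub_array])
      else if count = st.1 then (st.1, st.2 ++ [sub_array])
      else st) (m0, sel0)
    = ((l.map pvCnt).foldl max m0,
       (if m0 = (l.map pvCnt).foldl max m0 then sel0 else [])
         ++ l.filter (fun sa => pvCnt sa = (l.map pvCnt).foldl max m0)) := by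
  induction l generalizing m0 sel0 with
  | nil => simp
  | cons sa l ih =>
    simp only [List.foldl_cons, List.map_cons, List.filter_cons]
    by_cases h1 : pvCnt sa > m0
    · rw [if_pos h1, ih]
      have hmax : max m0 (pvCnt sa) = pvCnt sa := max_eq_right (le_of_lt h1)
      have hM : pvCnt sa ≤ (l.map pvCnt).foldl max (pvCnt sa) := pv_le_foldl_max _ _
      have hne : ¬ (m0 = (l.map pvCnt).foldl max (max m0 (pvCnt sa))) := by
        rw [hmax]; intro h; rw [← h] at hM; exact absurd h1 (not_lt.mpr hM)
      rw [if_neg hne]; simp only [hmax]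
      by_cases h2 : pvCnt sa = (l.map pvCnt).foldl max (pvCnt sa)
      · rw [if_pos h2]
        rw [List.nil_append, if_pos (decide_eq_true h2)]
        rfl
      · rw [if_neg h2]
        rw [List.nil_append, if_neg (by simpa using h2)]
        rfl
    · rw [if_neg h1]
      by_cases h2 : pvCnt sa = m0
      · rw [if_pos h2, ih]
        have hmax : max m0 (pvCnt sa) = m0 := max_eq_left (le_of_eq h2)
        simp only [hmax]
        by_cases h3 : m0 = (l.map pvCnt).foldl max m0
        · rw [if_pos h3, if_pos h3]
          have : pvCnt sa = (l.map pvCnt).foldl max m0 := h2.trans h3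
          simp [this]
        · rw [if_neg h3, if_neg h3]
          have : ¬ (pvCnt sa = (l.map pvCnt).foldl max m0) := by rw [h2]; exact h3
          simp [this]
      · rw [if_neg h2, ih]
        have hlt : pvCnt sa < m0 := lt_of_le_of_ne (not_lt.mp h1) h2
        have hmax : max m0 (pvCnt sa) = m0 := max_eq_left (le_of_lt hlt)
        simp only [hmax]
        have hM : m0 ≤ (l.map pvCnt).foldl max m0 := pv_le_foldl_max _ _
        have : ¬ (pvCnt sa = (l.map pvCnt).foldl max m0) :=
          fun h => absurd (h ▸ hM) (not_le.mpr hlt)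
        simp [this]

theorem pv_zip_filter (l : List (List (List Int))) (m : Int) :
    (((l.zip (l.map pvCnt)).filter (fun p => p.2 = m)).map (fun p => p.1))
    = l.filter (fun sa => pvCnt sa = m) := by
  induction l with
  | nil => simp
  | cons sa l ih =>
    simp only [List.map_cons, List.zip_cons_cons, List.filter_cons]
    by_cases h : pvCnt sa = m
    · simp [h, ih]
    · simp [h, ih]

theorem via_config_select_spec : Claim_equal_via_config_select := by
  intro outputs _
  unfold Spec_via_config_select via_config_select via_config_select_alt
  show (outputs.foldl (fun (st : Int × List (List (List Int))) sub_array =>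
      let count := pvCnt sub_array
      if count > st.1 then (count, [sub_array])
      else if count = st.1 then (st.1, st.2 ++ [sub_array])
      else st) ((0:Int), [])).2 = _
  rw [pv_fold_char]
  show (if (0:Int) = (outputs.map pvCnt).foldl max 0 then ([] : List (List (List Int))) else [])
        ++ outputs.filter (fun sa => pvCnt sa = (outputs.map pvCnt).foldl max 0)
      = ((outputs.zip (outputs.map pvCnt)).filter (fun p => p.2 = (outputs.map pvCnt).foldl max 0)).map (fun p => p.1)
  rw [pv_zip_filter]
  split <;> simp
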